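-- pv_equiv track=rewrite | github.com/IcQuackson/FP | The Maze project-part1.py | eh_conj_posicoes
-- ===== SOURCE A (Python) =====
-- def eh_posicao(posicao):
--
--     """Esta funcao recebe um argumento de qualquer tipo e devolve True se o seu argumento corresponde a uma posicao
--        e False caso contrario, sem nunca gerar erros. Considera-se que uma posicao corresponde a um tuplo contendo 2
--        valores inteiros nao negativos correspondendo a uma posicao (x, y) num labirinto."""
--
--     # verifica se a posicao nao eh um tuplo
--     if not isinstance(posicao, tuple):
--         return False
--
--     # verifica se a posicao nao tem dois elementos
--     if not len(posicao) == 2: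
--         return False
--
--     # verifica se a posicao eh um tuplo de numeros inteiros
--     for e in posicao:
--         if not isinstance(e, int):
--             return False
--
--     # verifica se a posicao tem coordenadas negativas
--     if not (posicao[0] >= 0 and posicao[1] >= 0):
--         return False
--
--     # se o argumento for valido
--     return True
--
-- def eh_conj_posicoes(conj_posicoes):  # checked
--
--     """Esta funcao recebe um argumento de qualquer tipo e devolve True se o seu argumento corresponde a um conjunto de
--        posicoes diferentes e False caso contrario, sem nunca gerar erros. Considera-se que um conjunto de posicoes
--        corresponde a um tuplo contendo 0 ou mais posicoes diferentes."""
--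
--     # verifica se o conj_posicoes nao eh um tuplo
--     if not isinstance(conj_posicoes, tuple):
--         return False
--
--     # verifica se o conj_posicoes eh um tuplo contendo 0 posicoes
--     if len(conj_posicoes) == 0:
--         return True
--
--     for tuplo in conj_posicoes:
--
--         # verifica se o tuplo dentro de conj_posicoes nao eh uma posicao
--         if not eh_posicao(tuplo):
--             return False
--
--     # verifica se a posicao nao eh unica no conj_posicoes
--     if sorted(tuple(set(conj_posicoes))) != sorted(conj_posicoes):
--         return False
--
--     # se o argumento for valido
--     return True
-- ===== SOURCE B (Python) =====
-- def eh_posicao(posicao):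
--     if not isinstance(posicao, tuple):
--         return False
--     if not len(posicao) == 2:
--         return False
--     for e in posicao:
--         if not isinstance(e, int):
--             return False
--     if not (posicao[0] >= 0 and posicao[1] >= 0):
--         return False
--     return True
--
--
-- def eh_conj_posicoes(conj_posicoes):
--     # one incremental pass: validate each element and detect duplicates with a seen set
--     if not isinstance(conj_posicoes, tuple):
--         return False
--     seen = set()
--     for p in conj_posicoes:
--         if not eh_posicao(p):
--             return False
--         if p in seen:
--             return False
--         seen.add(p)
--     return True
-- ===== Notes on version B (the rewrite author's own statement) =====
-- stated objective: simpler
-- what changed: Replaced A's separate validation loop plus sort-and-compare duplicate test (sorted(set(t)) != sorted(t)) with one incremental pass that validates each position and detects duplicates via a seen set, returning early.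
import Mathlib
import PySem

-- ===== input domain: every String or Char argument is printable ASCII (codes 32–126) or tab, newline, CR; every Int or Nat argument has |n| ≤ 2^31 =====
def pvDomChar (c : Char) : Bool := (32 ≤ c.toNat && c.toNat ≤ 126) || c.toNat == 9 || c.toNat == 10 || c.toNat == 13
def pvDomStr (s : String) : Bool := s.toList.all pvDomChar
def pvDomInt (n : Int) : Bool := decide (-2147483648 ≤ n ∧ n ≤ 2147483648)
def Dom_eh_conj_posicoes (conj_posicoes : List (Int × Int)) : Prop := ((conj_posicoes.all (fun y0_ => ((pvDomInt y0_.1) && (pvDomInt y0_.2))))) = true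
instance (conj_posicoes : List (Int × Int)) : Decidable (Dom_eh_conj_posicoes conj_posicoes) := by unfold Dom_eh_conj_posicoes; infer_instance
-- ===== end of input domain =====

-- B fuses A's validation loop and its sort-based duplicate test into one pass with a seen set (objective: simpler; same booleans).

-- ===== PORT A =====
-- helper eh_posicao, shared verbatim by both Python versions; under the List (Int × Int)
-- typing the isinstance/length/int checks always succeed, leaving the sign test.
def ehPosicao (posicao : Int × Int) : Bool :=
  if !(decide (posicao.1 ≥ 0) && decide (posicao.2 ≥ 0)) then false
  else true

-- A's 'for tuplo in conj_posicoes: if not eh_posicao(tuplo): return False'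
def ehConjLoopA : List (Int × Int) → Bool
  | [] => true
  | t :: rest => if !(ehPosicao t) then false else ehConjLoopA rest

def eh_conj_posicoes (conj_posicoes : List (Int × Int)) : Bool :=
  if conj_posicoes.length = 0 then true
  else if ehConjLoopA conj_posicoes = false then false
  else if PySem.List.sorted2 (PySem.Set.ofList conj_posicoes) (fun x => x.1) (fun x => x.2)
          ≠ PySem.List.sorted2 conj_posicoes (fun x => x.1) (fun x => x.2) then false
  else true

-- ===== PORT B =====
-- B's single loop: 'for p in conj_posicoes: if not eh_posicao(p): return False;
--                   if p in seen: return False; seen.add(p)'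
def ehConjGoB (seen : PySem.Set (Int × Int)) : List (Int × Int) → Bool
  | [] => true
  | p :: rest =>
      if !(ehPosicao p) then false
      else if PySem.Set.contains seen p then false
      else ehConjGoB (PySem.Set.add seen p) rest

def eh_conj_posicoes_alt (conj_posicoes : List (Int × Int)) : Bool :=
  ehConjGoB PySem.Set.empty conj_posicoes

-- ===== PRECONDITION & SPEC =====
def Spec_eh_conj_posicoes (conj_posicoes : List (Int × Int)) (out : Bool) : Prop := out = eh_conj_posicoes_alt conj_posicoes
instance (conj_posicoes : List (Int × Int)) (out : Bool) : Decidable (Spec_eh_conj_posicoes conj_posicoes out) := by unfold Spec_eh_conj_posicoes; infer_instance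

-- ===== CLAIM (what is proved, stated in full; the proofs are below) =====
def Claim_equal_eh_conj_posicoes : Prop := ∀ (conj_posicoes : List (Int × Int)), Dom_eh_conj_posicoes conj_posicoes → Spec_eh_conj_posicoes conj_posicoes (eh_conj_posicoes conj_posicoes)

-- ===== LEMMAS AND PROOFS =====

theorem ehConjLoopA_eq_all (l : List (Int × Int)) : ehConjLoopA l = l.all ehPosicao := by
  induction l with
  | nil => rfl
  | cons t rest ih =>
      simp only [ehConjLoopA, List.all_cons, ih]
      by_cases h : ehPosicao t = true <;> simp [h]

theorem ofList_perm_dedup (l : List (Int × Int)) : (PySem.Set.ofList l).Perm l.dedup := by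
  apply List.Perm.symm
  apply (List.perm_ext_iff_of_nodup (List.nodup_dedup l) (PySem.Set.nodup_ofList l)).mpr
  intro x; simp [PySem.Set.mem_ofList]

theorem sorted2_set_eq_iff_nodup (l : List (Int × Int)) :
    PySem.List.sorted2 (PySem.Set.ofList l) (fun x => x.1) (fun x => x.2)
      = PySem.List.sorted2 l (fun x => x.1) (fun x => x.2) ↔ l.Nodup := by
  constructor
  · intro h
    have hlen : (PySem.Set.ofList l).length = l.length := by
      have h1 := (PySem.List.sorted2_perm (PySem.Set.ofList l) (fun x => x.1) (fun x => x.2) false).length_eq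
      have h2 := (PySem.List.sorted2_perm l (fun x => x.1) (fun x => x.2) false).length_eq
      rw [← h1, ← h2, h]
    have hd : l.dedup.length = l.length := by
      rw [← (ofList_perm_dedup l).length_eq, hlen]
    have := (List.dedup_sublist l).eq_of_length hd
    exact List.dedup_eq_self.mp this
  · intro h
    rw [PySem.Set.ofList_eq_self_of_nodup l h]

theorem ehConjGoB_iff (l : List (Int × Int)) : ∀ seen : PySem.Set (Int × Int),
    ehConjGoB seen l = true ↔
      (∀ p ∈ l, ehPosicao p = true) ∧ l.Nodup ∧ ∀ p ∈ l, p ∉ seen := by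
  induction l with
  | nil => intro seen; simp [ehConjGoB]
  | cons p rest ih =>
      intro seen
      simp only [ehConjGoB]
      by_cases hp : ehPosicao p = true
      · by_cases hs : p ∈ seen
        · have hc : PySem.Set.contains seen p = true := (PySem.Set.contains_iff seen p).mpr hs
          rw [hp]
          simp only [Bool.not_true, Bool.false_eq_true, if_false, hc, if_true]
          exact iff_of_false not_false (fun h => (h.2.2 p (by simp : p ∈ p :: rest)) hs)
        · have : PySem.Set.contains seen p = false := by
            rw [Bool.eq_false_iff]
            intro hc; exact hs ((PySem.Set.contains_iff seen p).mp hc)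
          rw [hp]
          simp only [Bool.not_true, Bool.false_eq_true, if_false, this, ih]
          constructor
          · rintro ⟨h1, h2, h3⟩
            refine ⟨?_, ?_, ?_⟩
            · intro q hq
              rcases List.mem_cons.mp hq with rfl | hq'
              · exact hp
              · exact h1 q hq'
            · rw [List.nodup_cons]
              refine ⟨fun hmem => ?_, h2⟩
              have := h3 p hmem
              exact this ((PySem.Set.mem_add seen p p).mpr (Or.inr rfl))
            · intro q hq
              rcases List.mem_cons.mp hq with rfl | hq'
              · exact hs
              · intro hqs
                exact h3 q hq' ((PySem.Set.mem_add seen p q).mpr (Or.inl hqs))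
          · rintro ⟨h1, h2, h3⟩
            rw [List.nodup_cons] at h2
            refine ⟨fun q hq => h1 q (List.mem_cons_of_mem _ hq), h2.2, ?_⟩
            intro q hq hqadd
            rcases (PySem.Set.mem_add seen p q).mp hqadd with hqs | rfl
            · exact h3 q (List.mem_cons_of_mem _ hq) hqs
            · exact h2.1 hq
      · simp only [Bool.not_eq_true] at hp
        simp [hp]

theorem A_iff (l : List (Int × Int)) :
    eh_conj_posicoes l = true ↔ (∀ p ∈ l, ehPosicao p = true) ∧ l.Nodup := by
  unfold eh_conj_posicoes
  rcases l with _ | ⟨p, rest⟩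
  · simp
  · simp only [List.length_cons, Nat.succ_ne_zero, if_false, ehConjLoopA_eq_all]
    by_cases hall : (p :: rest).all ehPosicao = true
    · rw [hall]
      simp only [Bool.true_eq_false, if_false, ite_not]
      rw [List.all_eq_true] at hall
      by_cases hnd : (p :: rest).Nodup
      · rw [if_pos ((sorted2_set_eq_iff_nodup _).mpr hnd)]
        exact iff_of_true rfl ⟨hall, hnd⟩
      · rw [if_neg (fun h => hnd ((sorted2_set_eq_iff_nodup _).mp h))]
        exact iff_of_false Bool.false_ne_true (fun h => hnd h.2)
    · rw [Bool.not_eq_true] at hall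
      rw [hall]
      simp only [if_true]
      rw [← Bool.not_eq_true, List.all_eq_true] at hall
      exact iff_of_false Bool.false_ne_true (fun h => hall h.1)

theorem B_iff (l : List (Int × Int)) :
    eh_conj_posicoes_alt l = true ↔ (∀ p ∈ l, ehPosicao p = true) ∧ l.Nodup := by
  unfold eh_conj_posicoes_alt
  rw [ehConjGoB_iff]
  simp [PySem.Set.empty]

-- ===== VERDICT (by name: the statement is the Claim_ definition above) =====
theorem eh_conj_posicoes_spec : Claim_equal_eh_conj_posicoes := by
  intro l _
  unfold Spec_eh_conj_posicoes
  rw [Bool.eq_iff_iff, A_iff, B_iff]
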